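-- pv_equiv track=rewrite | github.com/Anonymous-813259/Placement_Training | Day_12/task_3.py | rec_fun
-- ===== SOURCE A (Python) =====
-- def rec_fun(l1,l2,i,j,res,s):
--     if j==len(l2):
--         i+=1
--         j=0
--     if i==len(l1):
--         return res
--     if l1[i]%2==0 and l2[j]%2!=0:
--         s+=l1[i]+l2[j]
--     elif l1[i]%2!=0 and l2[j]%2==0:
--         res.append(l1[i]+l2[j])
--     return rec_fun(l1,l2,i,j+1,res,s)
-- ===== SOURCE B (Python) =====
-- def rec_fun(l1, l2, i, j, res, s):
--     if j == len(l2):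
--         i, j = i + 1, 0
--     while i != len(l1):
--         x, y = l1[i], l2[j]
--         if x % 2 != 0 and y % 2 == 0:
--             res.append(x + y)
--         j += 1
--         if j == len(l2):
--             i, j = i + 1, 0
--     return res
-- ===== Notes on version B (the rewrite author's own statement) =====
-- stated objective: simpler
-- what changed: Replaces A's one-pair-per-call recursion and its dead accumulator s by a single iterative while loop over the same pair of indices with one combined parity condition; Pre_ excludes exactly the inputs on which A raises IndexError (an out-of-range index after the first-line normalization).
import Mathlib
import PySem

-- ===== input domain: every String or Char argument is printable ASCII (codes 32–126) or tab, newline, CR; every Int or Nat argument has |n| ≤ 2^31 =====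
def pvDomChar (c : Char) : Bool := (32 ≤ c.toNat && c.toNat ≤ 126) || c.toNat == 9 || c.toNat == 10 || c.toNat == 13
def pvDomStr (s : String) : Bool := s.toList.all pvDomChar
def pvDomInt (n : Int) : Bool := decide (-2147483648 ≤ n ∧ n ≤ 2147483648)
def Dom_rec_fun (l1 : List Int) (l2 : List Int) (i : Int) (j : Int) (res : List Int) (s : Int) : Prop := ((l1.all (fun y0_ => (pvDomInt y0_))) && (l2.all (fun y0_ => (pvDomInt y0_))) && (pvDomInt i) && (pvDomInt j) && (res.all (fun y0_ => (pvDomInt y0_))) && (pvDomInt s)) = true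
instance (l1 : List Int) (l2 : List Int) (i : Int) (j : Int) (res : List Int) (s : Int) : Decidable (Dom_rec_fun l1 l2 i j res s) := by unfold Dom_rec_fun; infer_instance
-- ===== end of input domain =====

-- B replaces A's one-pair-per-call recursion (and its dead accumulator s) by one iterative
-- while loop over the same indices; in Python both append to and return the caller's res list,
-- and the equivalence proved here is about the return value.

-- ===== PORT A =====
-- used by both ports' termination arguments (cited in decreasing_by)
lemma pvBounds_of_some {α : Type} {xs : List α} {k : Int} {v : α}
    (h : PySem.List.pyGet? xs k = some v) : -(xs.length : Int) ≤ k ∧ k < xs.length := by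
  by_contra hc
  have hn : PySem.List.pyGet? xs k = none := by
    rw [PySem.List.pyGet?_eq_none_iff]
    simp only [PySem.Raise.InRange, not_and, not_lt]
    omega
  rw [h] at hn; cases hn

-- literal transliteration of A's recursion; 'let ij' is A's in-place normalization
-- 'if j==len(l2): i+=1; j=0'; pyGet? = none is Python's IndexError (excluded by Pre_),
-- where the port returns res.
def rec_fun (l1 : List Int) (l2 : List Int) (i : Int) (j : Int) (res : List Int) (s : Int) : List Int :=
  let ij : Int × Int := if j = (l2.length : Int) then (i + 1, 0) else (i, j)
  if ij.1 = (l1.length : Int) then res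
  else
    match h1 : PySem.List.pyGet? l1 ij.1, h2 : PySem.List.pyGet? l2 ij.2 with
    | some a, some b =>
      if PySem.Int.mod a 2 = 0 ∧ PySem.Int.mod b 2 ≠ 0 then
        rec_fun l1 l2 ij.1 (ij.2 + 1) res (s + (a + b))
      else if PySem.Int.mod a 2 ≠ 0 ∧ PySem.Int.mod b 2 = 0 then
        rec_fun l1 l2 ij.1 (ij.2 + 1) (res ++ [a + b]) s
      else
        rec_fun l1 l2 ij.1 (ij.2 + 1) res s
    | _, _ => res
termination_by (((l1.length : Int) - i).toNat * (2 * l2.length + 2) + ((l2.length : Int) - j).toNat)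
decreasing_by
  all_goals
    (simp only [ij] at h1 h2 ⊢
     by_cases hj : j = (l2.length : Int)
     · subst hj
       simp at h1 h2 ⊢
       obtain ⟨_, u2⟩ := pvBounds_of_some h1
       have e1 : ((l1.length : Int) - i).toNat = ((l1.length : Int) - (i + 1)).toNat + 1 := by omega
       rw [e1, Nat.add_mul, one_mul]
       omega
     · simp [hj] at h1 h2 ⊢
       obtain ⟨_, v2⟩ := pvBounds_of_some h2
       omega)

-- ===== PORT B =====
-- B's 'while i != len(l1)' loop: x, y = l1[i], l2[j] (pyGet? = none is B's IndexError,
-- excluded by Pre_; the port returns res there), the single combined parity test, then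
-- j += 1 and the end-of-row normalization 'if j == len(l2): i, j = i + 1, 0'.
def pvLoopB (l1 : List Int) (l2 : List Int) (i : Int) (j : Int) (res : List Int) : List Int :=
  if i = (l1.length : Int) then res
  else if h : PySem.Raise.InRange l1.length i ∧ PySem.Raise.InRange l2.length j then
    let x : Int := PySem.List.pyGetD l1 i 0
    let y : Int := PySem.List.pyGetD l2 j 0
    let res' : List Int :=
      if PySem.Int.mod x 2 ≠ 0 ∧ PySem.Int.mod y 2 = 0 then res ++ [x + y] else res
    if j + 1 = (l2.length : Int) then pvLoopB l1 l2 (i + 1) 0 res'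
    else pvLoopB l1 l2 i (j + 1) res'
  else res
termination_by (((l1.length : Int) - i).toNat, ((l2.length : Int) - j).toNat)
decreasing_by
  · exact Prod.Lex.left _ _ (by obtain ⟨⟨h1, h2⟩, -⟩ := h; omega)
  · exact Prod.Lex.right _ (by obtain ⟨-, ⟨h3, h4⟩⟩ := h; omega)

-- B's first line normalizes the start position, then the loop runs.
def rec_fun_alt (l1 : List Int) (l2 : List Int) (i : Int) (j : Int) (res : List Int) (s : Int) : List Int :=
  let i1 : Int := if j = (l2.length : Int) then i + 1 else i
  let j1 : Int := if j = (l2.length : Int) then 0 else j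
  pvLoopB l1 l2 i1 j1 res

-- ===== PRECONDITION & SPEC =====
-- Pre_ holds exactly on the inputs where the Python A returns (no IndexError): after A's
-- first-line normalization of (i, j), either i already equals len(l1), or both indices are in
-- Python's valid (negative-wrapping) range, which keeps every later access in range too.
def Pre_rec_fun (l1 : List Int) (l2 : List Int) (i : Int) (j : Int) (res : List Int) (s : Int) : Prop :=
  (if j = (l2.length : Int) then i + 1 else i) = (l1.length : Int) ∨
    (-(l1.length : Int) ≤ (if j = (l2.length : Int) then i + 1 else i) ∧
      (if j = (l2.length : Int) then i + 1 else i) < (l1.length : Int) ∧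
      -(l2.length : Int) ≤ (if j = (l2.length : Int) then (0 : Int) else j) ∧
      (if j = (l2.length : Int) then (0 : Int) else j) < (l2.length : Int))
instance (l1 : List Int) (l2 : List Int) (i : Int) (j : Int) (res : List Int) (s : Int) : Decidable (Pre_rec_fun l1 l2 i j res s) := by unfold Pre_rec_fun; infer_instance

def pvWitness_rec_fun : List Int × List Int × Int × Int × List Int × Int := ([1, 2, 3], [4, 5], 0, 0, [], 0)

def Spec_rec_fun (l1 : List Int) (l2 : List Int) (i : Int) (j : Int) (res : List Int) (s : Int) (out : List Int) : Prop := out = rec_fun_alt l1 l2 i j res s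
instance (l1 : List Int) (l2 : List Int) (i : Int) (j : Int) (res : List Int) (s : Int) (out : List Int) : Decidable (Spec_rec_fun l1 l2 i j res s out) := by unfold Spec_rec_fun; infer_instance

-- ===== CLAIM (what is proved, stated in full; the proofs are below) =====
def Claim_equal_rec_fun : Prop := ∀ (l1 : List Int) (l2 : List Int) (i : Int) (j : Int) (res : List Int) (s : Int), Dom_rec_fun l1 l2 i j res s → Pre_rec_fun l1 l2 i j res s → Spec_rec_fun l1 l2 i j res s (rec_fun l1 l2 i j res s)

-- ===== LEMMAS AND PROOFS =====

lemma pvSome_of_bounds {α : Type} (xs : List α) (k : Int)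
    (h1 : -(xs.length : Int) ≤ k) (h2 : k < xs.length) : ∃ v, PySem.List.pyGet? xs k = some v := by
  cases hv : PySem.List.pyGet? xs k with
  | none =>
      rw [PySem.List.pyGet?_eq_none_iff] at hv
      exact absurd ⟨h1, h2⟩ hv
  | some v => exact ⟨v, rfl⟩

lemma pvLoopB_exit (l1 l2 : List Int) (i j : Int) (res : List Int)
    (h : i = (l1.length : Int)) : pvLoopB l1 l2 i j res = res := by
  rw [pvLoopB]; simp [h]

lemma pvLoopB_step (l1 l2 : List Int) (i j : Int) (res : List Int) (x y : Int)
    (hi : i ≠ (l1.length : Int))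
    (hx : PySem.List.pyGet? l1 i = some x) (hy : PySem.List.pyGet? l2 j = some y) :
    pvLoopB l1 l2 i j res =
      (if j + 1 = (l2.length : Int) then
        pvLoopB l1 l2 (i + 1) 0
          (if PySem.Int.mod x 2 ≠ 0 ∧ PySem.Int.mod y 2 = 0 then res ++ [x + y] else res)
      else
        pvLoopB l1 l2 i (j + 1)
          (if PySem.Int.mod x 2 ≠ 0 ∧ PySem.Int.mod y 2 = 0 then res ++ [x + y] else res)) := by
  have hxr : PySem.Raise.InRange l1.length i := by
    have hb := pvBounds_of_some hx
    simp [PySem.Raise.InRange]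
    omega
  have hyr : PySem.Raise.InRange l2.length j := by
    have hb := pvBounds_of_some hy
    simp [PySem.Raise.InRange]
    omega
  have ex : PySem.List.pyGetD l1 i 0 = x := by simp [PySem.List.pyGetD, hx]
  have ey : PySem.List.pyGetD l2 j 0 = y := by simp [PySem.List.pyGetD, hy]
  rw [pvLoopB, if_neg hi, dif_pos ⟨hxr, hyr⟩]
  simp only [ex, ey]

lemma pvMain (l1 l2 : List Int) (N : Nat) :
    ∀ (i j : Int) (res : List Int) (s : Int),
      (((l1.length : Int) - i).toNat * (2 * l2.length + 2) + ((l2.length : Int) - j).toNat) ≤ N →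
      Pre_rec_fun l1 l2 i j res s →
      rec_fun l1 l2 i j res s =
        pvLoopB l1 l2 (if j = (l2.length : Int) then i + 1 else i)
          (if j = (l2.length : Int) then 0 else j) res := by
  induction N using Nat.strong_induction_on with
  | _ N IH =>
    intro i j res s hμ hpre
    unfold Pre_rec_fun at hpre
    by_cases hj : j = (l2.length : Int)
    · subst hj
      simp at hpre ⊢
      rw [rec_fun]
      by_cases hi : i + 1 = (l1.length : Int)
      · simp [hi, pvLoopB_exit _ _ _ _ _ rfl]
      · rcases hpre with h | ⟨hb1, hb2, hb3⟩
        · exact absurd h hi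
        obtain ⟨x, hx⟩ := pvSome_of_bounds l1 (i + 1) hb1 hb2
        obtain ⟨y, hy⟩ := pvSome_of_bounds l2 0 (by omega) (by omega)
        simp only [ite_true, if_neg hi]
        have hμ' : (((l1.length : Int) - (i + 1)).toNat * (2 * l2.length + 2) +
            ((l2.length : Int) - (0 + 1)).toNat) < N := by
          have e1 : ((l1.length : Int) - i).toNat = ((l1.length : Int) - (i + 1)).toNat + 1 := by
            omega
          rw [e1, Nat.add_mul, one_mul] at hμ
          omega
        have hpre' : ∀ (r : List Int) (t : Int), Pre_rec_fun l1 l2 (i + 1) (0 + 1) r t := by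
          intro r t
          unfold Pre_rec_fun
          by_cases h2 : (0 : Int) + 1 = (l2.length : Int) <;> simp [h2] <;> omega
        split
        next a' b' h1 h2 =>
          simp at h1 h2
          have hstep : pvLoopB l1 l2 (i + 1) 0 res =
              pvLoopB l1 l2 (if (0 : Int) + 1 = (l2.length : Int) then i + 1 + 1 else i + 1)
                (if (0 : Int) + 1 = (l2.length : Int) then 0 else 0 + 1)
                (if PySem.Int.mod a' 2 ≠ 0 ∧ PySem.Int.mod b' 2 = 0 then res ++ [a' + b'] else res) := by
            rw [pvLoopB_step l1 l2 (i + 1) 0 res a' b' hi h1 h2]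
            by_cases h3 : (0 : Int) + 1 = (l2.length : Int)
            · simp only [if_pos h3]
            · simp only [if_neg h3]
          split_ifs with c1 c2
          · rw [IH _ hμ' (i + 1) (0 + 1) res (s + (a' + b')) le_rfl (hpre' _ _), hstep]
            congr 1
            rw [if_neg (by tauto)]
          · rw [IH _ hμ' (i + 1) (0 + 1) (res ++ [a' + b']) s le_rfl (hpre' _ _), hstep]
            congr 1
            rw [if_pos c2]
          · rw [IH _ hμ' (i + 1) (0 + 1) res s le_rfl (hpre' _ _), hstep]
            congr 1
            rw [if_neg (by tauto)]
        next hz =>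
          simp at hz
          exact (hz x y hx hy).elim
    · simp [hj] at hpre ⊢
      rw [rec_fun]
      by_cases hi : i = (l1.length : Int)
      · simp [hj, hi, pvLoopB_exit _ _ _ _ _ rfl]
      · rcases hpre with h | ⟨hb1, hb2, hb3, hb4⟩
        · exact absurd h hi
        obtain ⟨x, hx⟩ := pvSome_of_bounds l1 i hb1 hb2
        obtain ⟨y, hy⟩ := pvSome_of_bounds l2 j hb3 hb4
        simp only [if_neg hj, if_neg hi]
        have hμ' : (((l1.length : Int) - i).toNat * (2 * l2.length + 2) +
            ((l2.length : Int) - (j + 1)).toNat) < N := by omega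
        have hpre' : ∀ (r : List Int) (t : Int), Pre_rec_fun l1 l2 i (j + 1) r t := by
          intro r t
          unfold Pre_rec_fun
          by_cases h2 : j + 1 = (l2.length : Int) <;> simp [h2] <;> omega
        split
        next a' b' h1 h2 =>
          simp [hj] at h1 h2
          have hstep : pvLoopB l1 l2 i j res =
              pvLoopB l1 l2 (if j + 1 = (l2.length : Int) then i + 1 else i)
                (if j + 1 = (l2.length : Int) then 0 else j + 1)
                (if PySem.Int.mod a' 2 ≠ 0 ∧ PySem.Int.mod b' 2 = 0 then res ++ [a' + b'] else res) := by
            rw [pvLoopB_step l1 l2 i j res a' b' hi h1 h2]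
            by_cases h3 : j + 1 = (l2.length : Int)
            · simp only [if_pos h3]
            · simp only [if_neg h3]
          split_ifs with c1 c2
          · rw [IH _ hμ' i (j + 1) res (s + (a' + b')) le_rfl (hpre' _ _), hstep]
            congr 1
            rw [if_neg (by tauto)]
          · rw [IH _ hμ' i (j + 1) (res ++ [a' + b']) s le_rfl (hpre' _ _), hstep]
            congr 1
            rw [if_pos c2]
          · rw [IH _ hμ' i (j + 1) res s le_rfl (hpre' _ _), hstep]
            congr 1
            rw [if_neg (by tauto)]
        next hz =>
          simp [hj] at hz
          exact (hz x y hx hy).elim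

-- B's normalization makes rec_fun_alt exactly the pvLoopB call pvMain produces.
lemma pvAlt (l1 l2 : List Int) (i j : Int) (res : List Int) (s : Int) :
    rec_fun_alt l1 l2 i j res s =
      pvLoopB l1 l2 (if j = (l2.length : Int) then i + 1 else i)
        (if j = (l2.length : Int) then 0 else j) res := rfl

-- ===== VERDICT (by name: the statement is the Claim_ definition above) =====
theorem rec_fun_spec : Claim_equal_rec_fun := by
  intro l1 l2 i j res s _hdom hpre
  unfold Spec_rec_fun
  rw [pvAlt l1 l2 i j res s]
  exact pvMain l1 l2 _ i j res s le_rfl hpre
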